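-- pv_equiv track=rewrite | github.com/tianhm/gptme | gptme/tools/tts.py | join_short_sentences
-- ===== SOURCE A (Python) =====
-- def join_short_sentences(
--     sentences: list[str], min_length: int = 100, max_length: int | None = 300
-- ) -> list[str]:
--     """Join consecutive sentences that are shorter than min_length, or up to max_length.
--
--     Args:
--         sentences: List of sentences to potentially join
--         min_length: Minimum length threshold for joining short sentences
--         max_length: Maximum length for combined sentences. If specified, tries to make
--                    sentences as long as possible up to this limit
--
--     Returns:
--         List of sentences, with short ones combined or optimized for max length
--     """
--     result = []
--     current = ""
--
--     for sentence in sentences: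
--         if not sentence.strip():
--             if current:
--                 result.append(current)
--                 current = ""
--             result.append(sentence)  # Preserve empty lines
--             continue
--
--         if not current:
--             current = sentence
--         else:
--             # Join sentences with a single space after punctuation
--             combined = f"{current} {sentence.lstrip()}"
--
--             if max_length is not None:
--                 # Max length mode: combine as long as possible up to max_length
--                 if len(combined) <= max_length:
--                     current = combined
--                 else:
--                     result.append(current)
--                     current = sentence
--             else:
--                 # Min length mode: combine only if result is still under min_length
--                 if len(combined) <= min_length:
--                     current = combined
--                 else:
--                     result.append(current)
--                     current = sentence
--
--     if current:
--         result.append(current)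
--
--     return result
-- ===== SOURCE B (Python) =====
-- def _pack(group, limit):
--     """Greedily pack a run of non-blank sentences under the single limit."""
--     packed = []
--     current = group[0]
--     for s in group[1:]:
--         combined = f"{current} {s.lstrip()}"
--         if len(combined) <= limit:
--             current = combined
--         else:
--             packed.append(current)
--             current = s
--     packed.append(current)
--     return packed
--
--
-- def join_short_sentences(
--     sentences: list[str], min_length: int = 100, max_length: int | None = 300
-- ) -> list[str]:
--     # One effective limit; partition into maximal blank / non-blank runs,
--     # emit blanks verbatim and greedily pack each non-blank run.
--     limit = max_length if max_length is not None else min_length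
--     out = []
--     i, n = 0, len(sentences)
--     while i < n:
--         s = sentences[i]
--         if not s.strip():
--             out.append(s)
--             i += 1
--             continue
--         j = i + 1
--         while j < n and sentences[j].strip():
--             j += 1
--         out.extend(_pack(sentences[i:j], limit))
--         i = j
--     return out
-- ===== Notes on version B (the rewrite author's own statement) =====
-- stated objective: alternative
-- what changed: Replaces A's single stateful loop carrying (result, current) with a per-branch limit check by a two-level decomposition: the effective limit (max_length if set, else min_length) is computed once, the input is partitioned into maximal runs of blank vs non-blank sentences, blanks are emitted verbatim and each non-blank run is packed by a separate greedy helper.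
import Mathlib
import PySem

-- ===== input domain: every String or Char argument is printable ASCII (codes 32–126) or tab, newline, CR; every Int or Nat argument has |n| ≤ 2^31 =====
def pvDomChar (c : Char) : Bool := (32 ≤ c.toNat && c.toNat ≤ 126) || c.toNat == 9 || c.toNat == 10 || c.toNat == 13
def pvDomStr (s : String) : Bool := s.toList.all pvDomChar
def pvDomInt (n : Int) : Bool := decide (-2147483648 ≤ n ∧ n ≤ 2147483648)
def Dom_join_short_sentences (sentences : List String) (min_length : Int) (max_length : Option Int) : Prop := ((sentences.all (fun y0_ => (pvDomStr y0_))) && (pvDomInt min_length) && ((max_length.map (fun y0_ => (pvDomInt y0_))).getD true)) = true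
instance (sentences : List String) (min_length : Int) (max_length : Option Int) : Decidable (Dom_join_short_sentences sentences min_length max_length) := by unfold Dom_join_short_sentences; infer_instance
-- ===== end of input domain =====

-- B replaces A's single stateful loop by a partition into maximal blank / non-blank runs
-- with a greedy per-run pack under one precomputed limit (objective: alternative decomposition).

-- ===== PORT A =====
-- one iteration of A's for-loop; state = (result, current)
def joinStepA (min_length : Int) (max_length : Option Int)
    (st : List String × String) (sentence : String) : List String × String :=
  let result := st.1
  let current := st.2
  if PySem.Str.strip sentence == "" then
    ((if current == "" then result else result ++ [current]) ++ [sentence], "")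
  else if current == "" then
    (result, sentence)
  else
    let combined := current ++ " " ++ PySem.Str.lstrip sentence
    match max_length with
    | some m =>
        if PySem.Str.len combined ≤ m then (result, combined)
        else (result ++ [current], sentence)
    | none =>
        if PySem.Str.len combined ≤ min_length then (result, combined)
        else (result ++ [current], sentence)

def join_short_sentences (sentences : List String) (min_length : Int) (max_length : Option Int) : List String :=
  let st := sentences.foldl (joinStepA min_length max_length) ([], "")
  if st.2 == "" then st.1 else st.1 ++ [st.2]

-- ===== PORT B =====
-- Source B: not s.strip()
def pvBlank (s : String) : Bool := PySem.Str.strip s == ""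

-- Source B _pack: greedy pack of a non-blank run; `cur` = group[0], the list = group[1:]
def packGroup (limit : Int) (cur : String) : List String → List String
  | [] => [cur]
  | s :: rest =>
      let combined := cur ++ " " ++ PySem.Str.lstrip s
      if PySem.Str.len combined ≤ limit then packGroup limit combined rest
      else cur :: packGroup limit s rest

-- Source B outer while-loop: blanks verbatim; a maximal non-blank run (sentences[i:j]) is packed
def groupsB (limit : Int) : List String → List String
  | [] => []
  | s :: rest =>
      if pvBlank s then s :: groupsB limit rest
      else packGroup limit s (rest.takeWhile (fun t => !pvBlank t)) ++
           groupsB limit (rest.dropWhile (fun t => !pvBlank t))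
termination_by l => l.length
decreasing_by
  · simp
  · exact Nat.lt_of_le_of_lt (List.length_dropWhile_le _ _) (by simp)

def join_short_sentences_alt (sentences : List String) (min_length : Int) (max_length : Option Int) : List String :=
  let limit := match max_length with | some m => m | none => min_length
  groupsB limit sentences

-- ===== PRECONDITION & SPEC =====
def Spec_join_short_sentences (sentences : List String) (min_length : Int) (max_length : Option Int) (out : List String) : Prop := out = join_short_sentences_alt sentences min_length max_length
instance (sentences : List String) (min_length : Int) (max_length : Option Int) (out : List String) : Decidable (Spec_join_short_sentences sentences min_length max_length out) := by unfold Spec_join_short_sentences; infer_instance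

-- ===== CLAIM (what is proved, stated in full; the proofs are below) =====
def Claim_equal_join_short_sentences : Prop := ∀ (sentences : List String) (min_length : Int) (max_length : Option Int), Dom_join_short_sentences sentences min_length max_length → Spec_join_short_sentences sentences min_length max_length (join_short_sentences sentences min_length max_length)

-- ===== LEMMAS AND PROOFS =====

-- recursive characterisation of A's loop (single limit already factored out)
def specA (lim : Int) : List String → String → List String
  | [], cur => if cur == "" then [] else [cur]
  | s :: rest, cur =>
      if pvBlank s then (if cur == "" then [] else [cur]) ++ s :: specA lim rest ""
      else if cur == "" then specA lim rest s
      else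
        let combined := cur ++ " " ++ PySem.Str.lstrip s
        if PySem.Str.len combined ≤ lim then specA lim rest combined
        else cur :: specA lim rest s

lemma specA_cons_le {lim : Int} {s cur : String} {rest : List String}
    (hb : pvBlank s = false) (hc : (cur == "") = false)
    (hl : PySem.Str.len (cur ++ " " ++ PySem.Str.lstrip s) ≤ lim) :
    specA lim (s :: rest) cur = specA lim rest (cur ++ " " ++ PySem.Str.lstrip s) := by
  simp only [specA, hb, Bool.false_eq_true, if_false, hc, if_pos hl]

lemma specA_cons_gt {lim : Int} {s cur : String} {rest : List String}
    (hb : pvBlank s = false) (hc : (cur == "") = false)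
    (hl : ¬ PySem.Str.len (cur ++ " " ++ PySem.Str.lstrip s) ≤ lim) :
    specA lim (s :: rest) cur = cur :: specA lim rest s := by
  simp only [specA, hb, Bool.false_eq_true, if_false, hc, if_neg hl]

lemma nonblank_ne_empty {s : String} (h : pvBlank s = false) : (s == "") = false := by
  by_contra hc
  have : s = "" := by
    cases he : (s == "") with
    | false => exact absurd he hc
    | true => exact eq_of_beq he
  subst this
  have : pvBlank "" = true := by rfl
  rw [this] at h
  exact Bool.noConfusion h

lemma combined_ne_empty (cur x : String) : ((cur ++ " " ++ x) == "") = false := by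
  cases he : ((cur ++ " " ++ x) == "") with
  | false => rfl
  | true =>
      have h := eq_of_beq he
      have : (cur ++ " " ++ x).toList = ("" : String).toList := by rw [h]
      simp at this

lemma foldA_eq (mn : Int) (mx : Option Int) :
    ∀ (l : List String) (res : List String) (cur : String),
      (let st := l.foldl (joinStepA mn mx) (res, cur)
       if st.2 == "" then st.1 else st.1 ++ [st.2]) =
      res ++ specA (match mx with | some m => m | none => mn) l cur := by
  intro l
  induction l with
  | nil =>
      intro res cur
      simp only [List.foldl_nil, specA]
      split <;> simp
  | cons s rest ih =>
      intro res cur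
      simp only [List.foldl_cons]
      by_cases hb : pvBlank s = true
      · have hb' : (PySem.Str.strip s == "") = true := hb
        cases hc : (cur == "") with
        | true =>
            simp only [joinStepA, hb', hc, if_true]
            rw [ih]
            simp [specA, hb, hc]
        | false =>
            simp only [joinStepA, hb', hc, if_true]
            rw [ih]
            simp [specA, hb, hc]
  -- non-blank sentence
      · have hb' : (PySem.Str.strip s == "") = false := eq_false_of_ne_true hb
        have hbf : pvBlank s = false := eq_false_of_ne_true hb
        cases hc : (cur == "") with
        | true =>
            simp only [joinStepA, hb', hc]
            rw [ih]
            simp [specA, hbf, hc]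
        | false =>
            cases mx with
            | none =>
                simp only [joinStepA, hb', hc, Bool.false_eq_true, if_false]
                by_cases hl : PySem.Str.len (cur ++ " " ++ PySem.Str.lstrip s) ≤ mn
                · simp only [if_pos hl]
                  rw [ih, specA_cons_le hbf hc hl]
                · simp only [if_neg hl]
                  rw [ih, specA_cons_gt hbf hc hl]
                  simp
            | some m =>
                simp only [joinStepA, hb', hc, Bool.false_eq_true, if_false]
                by_cases hl : PySem.Str.len (cur ++ " " ++ PySem.Str.lstrip s) ≤ m
                · simp only [if_pos hl]
                  rw [ih, specA_cons_le hbf hc hl]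
                · simp only [if_neg hl]
                  rw [ih, specA_cons_gt hbf hc hl]
                  simp

-- specA from the empty state is B's run decomposition; simultaneous strong induction
lemma specA_eq_groupsB (lim : Int) :
    ∀ (n : Nat) (l : List String), l.length ≤ n →
      (specA lim l "" = groupsB lim l ∧
       ∀ cur, (cur == "") = false →
         specA lim l cur =
           packGroup lim cur (l.takeWhile (fun t => !pvBlank t)) ++
           groupsB lim (l.dropWhile (fun t => !pvBlank t))) := by
  intro n
  induction n with
  | zero =>
      intro l h
      have : l = [] := List.eq_nil_of_length_eq_zero (Nat.le_zero.mp h)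
      subst this
      constructor
      · simp [specA, groupsB.eq_def]
      · intro cur hc
        simp [specA, hc, packGroup, groupsB.eq_def]
  | succ n ih =>
      intro l h
      cases l with
      | nil =>
          constructor
          · simp [specA, groupsB.eq_def]
          · intro cur hc
            simp [specA, hc, packGroup, groupsB.eq_def]
      | cons s rest =>
          have hr : rest.length ≤ n := by
            simpa using Nat.lt_succ_iff.mp (Nat.lt_of_lt_of_le (by simp) h)
          have hdw : (rest.dropWhile (fun t => !pvBlank t)).length ≤ n :=
            Nat.le_trans (List.length_dropWhile_le _ _) hr
          constructor
          · -- P (s :: rest)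
            by_cases hb : pvBlank s = true
            · rw [groupsB.eq_def]
              simp only [hb, if_true]
              simp only [specA, hb, if_true]
              simp [(ih rest hr).1]
            · have hbf : pvBlank s = false := eq_false_of_ne_true hb
              rw [groupsB.eq_def]
              simp only [hbf, Bool.false_eq_true, if_false]
              simp only [specA, hbf, Bool.false_eq_true, if_false]
              exact (ih rest hr).2 s (nonblank_ne_empty hbf)
          · -- Q (s :: rest)
            intro cur hc
            by_cases hb : pvBlank s = true
            · have htw : (s :: rest).takeWhile (fun t => !pvBlank t) = [] := by
                simp [List.takeWhile, hb]
              have hdw' : (s :: rest).dropWhile (fun t => !pvBlank t) = s :: rest := by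
                simp [List.dropWhile, hb]
              rw [htw, hdw']
              simp only [specA, hb, if_true, hc, Bool.false_eq_true, if_false, packGroup]
              rw [groupsB.eq_def]
              simp only [hb, if_true]
              simp [(ih rest hr).1]
            · have hbf : pvBlank s = false := eq_false_of_ne_true hb
              have htw : (s :: rest).takeWhile (fun t => !pvBlank t) =
                  s :: rest.takeWhile (fun t => !pvBlank t) := by
                simp [List.takeWhile, hbf]
              have hdw' : (s :: rest).dropWhile (fun t => !pvBlank t) =
                  rest.dropWhile (fun t => !pvBlank t) := by
                simp [List.dropWhile, hbf]
              rw [htw, hdw']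
              simp only [specA, hbf, Bool.false_eq_true, if_false, hc, packGroup]
              by_cases hl : PySem.Str.len (cur ++ " " ++ PySem.Str.lstrip s) ≤ lim
              · simp only [if_pos hl]
                exact (ih rest hr).2 _ (combined_ne_empty cur _)
              · simp only [if_neg hl]
                rw [(ih rest hr).2 s (nonblank_ne_empty hbf)]
                simp

-- ===== VERDICT (by name: the statement is the Claim_ definition above) =====
theorem join_short_sentences_spec : Claim_equal_join_short_sentences := by
  intro sentences min_length max_length _
  show join_short_sentences sentences min_length max_length =
    join_short_sentences_alt sentences min_length max_length
  unfold join_short_sentences join_short_sentences_alt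
  rw [foldA_eq min_length max_length sentences [] ""]
  simp [(specA_eq_groupsB _ sentences.length sentences (le_refl _)).1]
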